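-- pv_equiv track=rewrite | github.com/Arthanadftz/Codeacademy_ex | over_9000.py | over_nine_thousand_f
-- ===== SOURCE A (Python) =====
-- def over_nine_thousand_f(lst):
--   total = 0
--   if len(lst) < 1:
--     return 0
--   for i in lst:
--     if total > 9000:
--       break
--     else:
--       total += i
--   return total
-- ===== SOURCE B (Python) =====
-- def over_nine_thousand_f(lst):
--     # Phase 1: build the list of prefix sums.
--     prefix = []
--     t = 0
--     for x in lst:
--         t += x
--         prefix.append(t)
--     # Phase 2: select the first prefix sum strictly over 9000,
--     # else the full total (last prefix sum), else 0 for empty input.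
--     for s in prefix:
--         if s > 9000:
--             return s
--     return prefix[-1] if prefix else 0
-- ===== Notes on version B (the rewrite author's own statement) =====
-- stated objective: alternative
-- what changed: Replaces A's fused add-and-break loop with a two-phase structure: build the full prefix-sum list, then scan it for the first value strictly over 9000 (falling back to the last prefix sum, or 0 when empty).
import Mathlib
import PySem

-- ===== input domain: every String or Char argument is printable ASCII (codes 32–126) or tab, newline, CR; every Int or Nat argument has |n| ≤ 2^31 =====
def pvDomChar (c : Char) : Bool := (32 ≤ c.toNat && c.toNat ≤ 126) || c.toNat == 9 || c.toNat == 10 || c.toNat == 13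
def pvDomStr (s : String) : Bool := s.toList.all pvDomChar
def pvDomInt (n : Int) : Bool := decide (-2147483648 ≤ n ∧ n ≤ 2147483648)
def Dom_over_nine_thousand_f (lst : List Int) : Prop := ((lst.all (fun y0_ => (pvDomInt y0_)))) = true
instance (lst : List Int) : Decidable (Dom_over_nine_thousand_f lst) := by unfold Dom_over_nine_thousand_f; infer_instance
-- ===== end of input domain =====

-- B rebuilds A's fused add-and-break loop as two phases: build the prefix-sum list, then select from it (alternative decomposition, same cost).

-- ===== PORT A =====
-- A's for-loop with break: recursion over the list carrying `total`.
def ontLoopA : List Int → Int → Int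
  | [], total => total
  | i :: rest, total => if total > 9000 then total else ontLoopA rest (total + i)

def over_nine_thousand_f (lst : List Int) : Int :=
  if lst.length < 1 then 0 else ontLoopA lst 0

-- ===== PORT B =====
-- Phase 1 of Source B: the append loop building the prefix-sum list (state = running total t).
def ontPrefix (t : Int) : List Int → List Int
  | [] => []
  | x :: rest => (t + x) :: ontPrefix (t + x) rest

-- Phase 2 of Source B: scan for the first prefix sum strictly over 9000.
def ontFindOver : List Int → Option Int
  | [] => none
  | s :: rest => if s > 9000 then some s else ontFindOver rest

def over_nine_thousand_f_alt (lst : List Int) : Int :=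
  let pfx := ontPrefix 0 lst
  match ontFindOver pfx with
  | some s => s
  | none => (pfx.getLast?).getD 0

-- ===== PRECONDITION & SPEC =====
def Spec_over_nine_thousand_f (lst : List Int) (out : Int) : Prop := out = over_nine_thousand_f_alt lst
instance (lst : List Int) (out : Int) : Decidable (Spec_over_nine_thousand_f lst out) := by unfold Spec_over_nine_thousand_f; infer_instance

-- ===== CLAIM (what is proved, stated in full; the proofs are below) =====
def Claim_equal_over_nine_thousand_f : Prop := ∀ (lst : List Int), Dom_over_nine_thousand_f lst → Spec_over_nine_thousand_f lst (over_nine_thousand_f lst)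

-- ===== LEMMAS AND PROOFS =====

theorem ontLoopA_exceeded (lst : List Int) (t : Int) (h : t > 9000) : ontLoopA lst t = t := by
  cases lst with
  | nil => rfl
  | cons i rest => simp [ontLoopA, h]

theorem ont_key (lst : List Int) (t : Int) (h : t ≤ 9000) :
    ontLoopA lst t =
      (match ontFindOver (ontPrefix t lst) with
       | some s => s
       | none => ((ontPrefix t lst).getLast?).getD t) := by
  induction lst generalizing t with
  | nil => simp [ontLoopA, ontPrefix, ontFindOver]
  | cons i rest ih =>
    have hle : ¬ t > 9000 := by omega
    simp only [ontLoopA, ontPrefix, ontFindOver, if_neg hle]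
    by_cases hx : t + i > 9000
    · simp [if_pos hx, ontLoopA_exceeded rest (t + i) hx]
    · have hx' : t + i ≤ 9000 := by omega
      rw [if_neg hx, ih (t + i) hx']
      cases hfo : ontFindOver (ontPrefix (t + i) rest) with
      | some s => simp
      | none =>
        cases hp : ontPrefix (t + i) rest with
        | nil => simp
        | cons a as =>
          obtain ⟨y, hy⟩ : ∃ y, (a :: as).getLast? = some y :=
            Option.isSome_iff_exists.mp (by simp)
          simp [hy]

-- ===== VERDICT (by name: the statement is the Claim_ definition above) =====
theorem over_nine_thousand_f_spec : Claim_equal_over_nine_thousand_f := by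
  intro lst _
  unfold Spec_over_nine_thousand_f over_nine_thousand_f over_nine_thousand_f_alt
  cases lst with
  | nil => simp [ontPrefix, ontFindOver]
  | cons i rest =>
    simp only [List.length_cons]
    rw [if_neg (by omega)]
    simpa using ont_key (i :: rest) 0 (by omega)
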